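-- pv_equiv track=rewrite | github.com/Mattiaborrelli4/development-roadmap | 09-Security-Projects/web-vuln-scanner/parsers/link_parser.py | _check_suspicious_params
-- ===== SOURCE A (Python) =====
-- from typing import List, Set, Dict, Any
--
-- def _check_suspicious_params(params: List[str]) -> List[str]:
--     """
--     Check for suspicious parameter names
--
--     Args:
--         params: List of parameter names
--
--     Returns:
--         List of suspicious parameter names
--     """
--     suspicious_indicators = [
--         'password', 'passwd', 'pwd', 'secret', 'token', 'key',
--         'auth', 'session', 'id', 'user', 'admin', 'debug',
--         'test', 'file', 'page', 'redirect', 'url', 'next',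
--         'return', 'goto', 'file', 'path', 'folder', 'dir'
--     ]
--
--     found = []
--     for param in params:
--         param_lower = param.lower()
--         if any(indicator in param_lower for indicator in suspicious_indicators):
--             found.append(param)
--
--     return found
-- ===== SOURCE B (Python) =====
-- from typing import List
--
--
-- _INDICATORS = (
--     'password', 'passwd', 'pwd', 'secret', 'token', 'key',
--     'auth', 'session', 'id', 'user', 'admin', 'debug',
--     'test', 'file', 'page', 'redirect', 'url', 'next',
--     'return', 'goto', 'file', 'path', 'folder', 'dir'
-- )
--
--
-- def _has_suspicious(s: str) -> bool:
--     # single left-to-right scan: at each position try each indicator as a prefix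
--     for j in range(len(s) + 1):
--         for ind in _INDICATORS:
--             if s.startswith(ind, j):
--                 return True
--     return False
--
--
-- def _check_suspicious_params(params: List[str]) -> List[str]:
--     return [param for param in params if _has_suspicious(param.lower())]
-- ===== Notes on version B (the rewrite author's own statement) =====
-- stated objective: alternative
-- what changed: B replaces A's per-indicator substring-containment test ('indicator in param_lower' inside any()) with a single position-by-position scan of each lowered param that checks whether any indicator starts at that position, and builds the result with a filter comprehension instead of an accumulator loop.
import Mathlib
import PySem

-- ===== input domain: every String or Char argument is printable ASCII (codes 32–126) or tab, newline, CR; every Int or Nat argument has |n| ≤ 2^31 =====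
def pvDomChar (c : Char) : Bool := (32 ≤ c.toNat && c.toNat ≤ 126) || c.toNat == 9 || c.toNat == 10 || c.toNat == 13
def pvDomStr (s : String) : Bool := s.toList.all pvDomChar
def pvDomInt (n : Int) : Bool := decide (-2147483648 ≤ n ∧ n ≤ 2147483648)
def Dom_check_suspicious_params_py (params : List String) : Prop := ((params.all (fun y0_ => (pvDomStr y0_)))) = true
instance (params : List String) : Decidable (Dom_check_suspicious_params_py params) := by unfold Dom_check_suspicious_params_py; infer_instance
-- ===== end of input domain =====

-- B replaces the per-indicator substring-containment test with a single positional
-- prefix-scan of each lowered param and a filter instead of an accumulator loop (alternative, same cost).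


-- ===== PORT A =====
def suspiciousIndicators : List String :=
  ["password", "passwd", "pwd", "secret", "token", "key",
   "auth", "session", "id", "user", "admin", "debug",
   "test", "file", "page", "redirect", "url", "next",
   "return", "goto", "file", "path", "folder", "dir"]

def check_suspicious_params_py (params : List String) : List String :=
  params.foldl (fun found param =>
    let param_lower := PySem.Str.lower param
    if suspiciousIndicators.any (fun indicator => PySem.Str.isIn indicator param_lower)
    then found ++ [param] else found) []

-- ===== PORT B =====
def altIndicators : List (List Char) := suspiciousIndicators.map String.toList

-- port of _has_suspicious: the 'for j in range(len(s)+1)' scan as recursion over suffixes;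
-- s.startswith(ind, j) is a prefix test on the suffix at j
def hasSuspicious (s : List Char) : Bool :=
  match s with
  | [] => altIndicators.any (fun ind => PySem.Chars.startswith [] ind)
  | c :: rest =>
      altIndicators.any (fun ind => PySem.Chars.startswith (c :: rest) ind) || hasSuspicious rest

def check_suspicious_params_py_alt (params : List String) : List String :=
  params.filter (fun param => hasSuspicious (PySem.Chars.lower param.toList))

-- ===== PRECONDITION & SPEC =====
def Spec_check_suspicious_params_py (params : List String) (out : List String) : Prop := out = check_suspicious_params_py_alt params
instance (params : List String) (out : List String) : Decidable (Spec_check_suspicious_params_py params out) := by unfold Spec_check_suspicious_params_py; infer_instance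

-- ===== CLAIM (what is proved, stated in full; the proofs are below) =====
def Claim_equal_check_suspicious_params_py : Prop := ∀ (params : List String), Dom_check_suspicious_params_py params → Spec_check_suspicious_params_py params (check_suspicious_params_py params)

-- ===== LEMMAS AND PROOFS =====

-- the suffix scan finds exactly the indicators occurring as infix (substring) of s
theorem hasSuspicious_iff (s : List Char) :
    hasSuspicious s = true ↔ ∃ ind ∈ altIndicators, ind <:+: s := by
  induction s with
  | nil =>
      simp [hasSuspicious, PySem.Chars.startswith_iff]
  | cons c rest ih =>
      simp only [hasSuspicious, Bool.or_eq_true, List.any_eq_true,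
        PySem.Chars.startswith_iff, ih, List.infix_cons_iff]
      constructor
      · rintro (⟨a, ha, hp⟩ | ⟨a, ha, hi⟩)
        · exact ⟨a, ha, Or.inl hp⟩
        · exact ⟨a, ha, Or.inr hi⟩
      · rintro ⟨a, ha, hp | hi⟩
        · exact Or.inl ⟨a, ha, hp⟩
        · exact Or.inr ⟨a, ha, hi⟩

-- ===== VERDICT (by name: the statement is the Claim_ definition above) =====

theorem check_suspicious_params_py_spec : Claim_equal_check_suspicious_params_py := by
  intro params _
  unfold Spec_check_suspicious_params_py
  unfold check_suspicious_params_py check_suspicious_params_py_alt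
  rw [PySem.List.foldl_append_ite_eq_filter]
  simp only [List.nil_append]
  apply List.filter_congr
  intro p _
  have h : (suspiciousIndicators.any
      (fun indicator => PySem.Str.isIn indicator (PySem.Str.lower p)) = true)
      ↔ hasSuspicious (PySem.Chars.lower p.toList) = true := by
    rw [hasSuspicious_iff]
    simp only [List.any_eq_true, PySem.Str.isIn_iff_infix, PySem.Str.toList_lower,
      altIndicators, List.mem_map]
    constructor
    · rintro ⟨ind, hmem, hinf⟩
      exact ⟨ind.toList, ⟨ind, hmem, rfl⟩, hinf⟩
    · rintro ⟨l, ⟨ind, hmem, rfl⟩, hinf⟩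
      exact ⟨ind, hmem, hinf⟩
  rw [Bool.eq_iff_iff, decide_eq_true_iff]
  simpa using h
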